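-- pv_equiv track=rewrite | github.com/NewFan-TakashiHatakeyama/AIReady_graphsuite | governance/src/services/scoring.py | calculate_exposure_vector_counts
-- ===== SOURCE A (Python) =====
-- def calculate_exposure_vector_counts(vectors: list[str] | None) -> dict[str, int]:
--     counts: dict[str, int] = {}
--     for vector in vectors or []:
--         key = str(vector or "").strip().lower()
--         if not key:
--             continue
--         counts[key] = counts.get(key, 0) + 1
--     return dict(sorted(counts.items()))
-- ===== SOURCE B (Python) =====
-- def calculate_exposure_vector_counts(vectors):
--     keys = sorted(k for k in (str(v or "").strip().lower() for v in (vectors or [])) if k)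
--     result = {}
--     current = None  # (key, length) of the current run of equal keys
--     for k in keys:
--         if current is not None and current[0] == k:
--             current = (k, current[1] + 1)
--         else:
--             if current is not None:
--                 result[current[0]] = current[1]
--             current = (k, 1)
--     if current is not None:
--         result[current[0]] = current[1]
--     return result
-- ===== Notes on version B (the rewrite author's own statement) =====
-- stated objective: alternative
-- what changed: replaces hash-counting into a dict followed by sorting the items with a sort-then-group pass: the nonempty normalized keys are sorted first and the result dict is built by run-length scanning the sorted list
import Mathlib
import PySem

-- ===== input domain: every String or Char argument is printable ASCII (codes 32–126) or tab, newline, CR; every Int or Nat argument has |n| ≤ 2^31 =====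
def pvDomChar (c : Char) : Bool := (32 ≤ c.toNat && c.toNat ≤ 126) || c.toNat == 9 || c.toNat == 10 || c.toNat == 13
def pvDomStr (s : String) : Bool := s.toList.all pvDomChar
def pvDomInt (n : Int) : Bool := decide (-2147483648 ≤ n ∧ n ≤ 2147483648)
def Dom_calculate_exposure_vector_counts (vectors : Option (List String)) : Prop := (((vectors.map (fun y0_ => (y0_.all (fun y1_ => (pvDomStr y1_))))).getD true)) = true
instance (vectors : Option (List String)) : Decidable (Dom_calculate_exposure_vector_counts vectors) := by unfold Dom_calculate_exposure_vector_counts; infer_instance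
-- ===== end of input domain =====

-- B replaces A's hash-counting loop + sorted(items) with a sort-then-group pass:
-- sort the nonempty normalized keys first, then run-length scan the sorted list (alternative algorithm).

-- shared normalization: str(vector or "").strip().lower()  (str() is the identity on str;
-- 'vector or ""' is "" when vector == "" and vector otherwise)
def pvNorm (vector : String) : String :=
  PySem.Str.lower (PySem.Str.strip (if vector = "" then "" else vector))

-- ===== PORT A =====
def calculate_exposure_vector_counts (vectors : Option (List String)) : List (String × Int) :=
  let counts : PySem.Dict String Int :=
    (vectors.getD []).foldl (fun counts vector =>
      let key := pvNorm vector
      if key = "" then counts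
      else counts.insert key (counts.getD key 0 + 1)) PySem.Dict.empty
  -- dict(sorted(counts.items())): pairs sorted by Python's tuple order
  PySem.List.sorted2 counts.items Prod.fst Prod.snd

-- ===== PORT B =====
-- loop body: extend the current run, or flush it into result and start a new one
def pvStepB (st : PySem.Dict String Int × Option (String × Int)) (k : String) :
    PySem.Dict String Int × Option (String × Int) :=
  match st.2 with
  | some (ck, cn) =>
    if ck = k then (st.1, some (k, cn + 1))
    else (st.1.insert ck cn, some (k, 1))
  | none => (st.1, some (k, 1))

-- trailing 'if current is not None: result[current[0]] = current[1]'
def pvFlush (st : PySem.Dict String Int × Option (String × Int)) : PySem.Dict String Int :=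
  match st.2 with
  | some (ck, cn) => st.1.insert ck cn
  | none => st.1

def calculate_exposure_vector_counts_alt (vectors : Option (List String)) : List (String × Int) :=
  let keys := PySem.List.sorted
      (((vectors.getD []).map pvNorm).filter (fun k => decide (k ≠ ""))) (fun x => x)
  (pvFlush (keys.foldl pvStepB (PySem.Dict.empty, none))).items

-- ===== PRECONDITION & SPEC =====
def Spec_calculate_exposure_vector_counts (vectors : Option (List String)) (out : List (String × Int)) : Prop := out = calculate_exposure_vector_counts_alt vectors
instance (vectors : Option (List String)) (out : List (String × Int)) : Decidable (Spec_calculate_exposure_vector_counts vectors out) := by unfold Spec_calculate_exposure_vector_counts; infer_instance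

-- ===== CLAIM (what is proved, stated in full; the proofs are below) =====
def Claim_equal_calculate_exposure_vector_counts : Prop := ∀ (vectors : Option (List String)), Dom_calculate_exposure_vector_counts vectors → Spec_calculate_exposure_vector_counts vectors (calculate_exposure_vector_counts vectors)

-- ===== LEMMAS AND PROOFS =====

-- insertBy only looks at the comparator on (x, member-of-ys) pairs
theorem pv_insertBy_congr {α : Type} (f g : α → α → Bool) (x : α) :
    ∀ (ys : List α), (∀ y ∈ ys, f x y = g x y) →
      PySem.List.insertBy f x ys = PySem.List.insertBy g x ys := by
  intro ys
  induction ys with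
  | nil => intro _; rfl
  | cons y ys ih =>
    intro h
    simp only [PySem.List.insertBy]
    rw [h y (by simp)]
    by_cases hg : g x y = true
    · simp [hg]
    · simp only [Bool.not_eq_true] at hg
      simp [hg, ih (fun z hz => h z (by simp [hz]))]

-- an insertBy-fold only looks at the comparator on pairs drawn from acc ++ l
theorem pv_foldl_insertBy_congr {α : Type} (f g : α → α → Bool) :
    ∀ (l acc : List α),
      (∀ x ∈ l, ∀ y, (y ∈ acc ∨ y ∈ l) → f x y = g x y) →
      l.foldl (fun acc x => PySem.List.insertBy f x acc) acc
        = l.foldl (fun acc x => PySem.List.insertBy g x acc) acc := by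
  intro l
  induction l with
  | nil => intro _ _; rfl
  | cons x l ih =>
    intro acc h
    simp only [List.foldl_cons]
    rw [pv_insertBy_congr f g x acc (fun y hy => h x (by simp) y (Or.inl hy))]
    apply ih
    intro x' hx' y hy
    refine h x' (by simp [hx']) y ?_
    rcases hy with hy | hy
    · rcases (PySem.List.mem_insertBy g x y acc).mp hy with rfl | hy
      · exact Or.inr (by simp)
      · exact Or.inl hy
    · exact Or.inr (by simp [hy])

-- sorting pairs with pairwise-distinct first components by the whole tuple = sorting by fst
theorem pv_sorted2_eq_sorted_fst {κ ν : Type} [LinearOrder κ] [LinearOrder ν]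
    (xs : List (κ × ν)) (h : ∀ a ∈ xs, ∀ b ∈ xs, a.1 = b.1 → a = b) :
    PySem.List.sorted2 xs Prod.fst Prod.snd = PySem.List.sorted xs Prod.fst := by
  rw [PySem.List.sorted_eq_foldl_insertBy]
  show xs.foldl (fun acc x => PySem.List.insertBy
      (fun a b => decide (a.1 < b.1) || (!decide (b.1 < a.1) && decide (a.2 < b.2))) x acc) []
    = _
  apply pv_foldl_insertBy_congr
  intro a ha b hb
  rcases hb with hb | hb
  · cases hb
  rcases lt_trichotomy a.1 b.1 with hlt | heq | hgt
  · simp [hlt, not_lt.mpr (le_of_lt hlt)]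
  · have : a = b := h a ha b hb heq
    subst this
    simp
  · simp [hgt, not_lt.mpr (le_of_lt hgt)]

-- A's skip-empties counting loop is the counter of the filtered normalized keys
theorem pv_foldA (l : List String) (d : PySem.Dict String Int) :
    l.foldl (fun counts vector =>
      let key := pvNorm vector
      if key = "" then counts
      else counts.insert key (counts.getD key 0 + 1)) d
    = ((l.map pvNorm).filter (fun k => decide (k ≠ ""))).foldl
        (fun d k => d.insert k (d.getD k 0 + 1)) d := by
  induction l generalizing d with
  | nil => simp
  | cons v l ih =>
    simp only [List.foldl_cons, List.map_cons, List.filter_cons]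
    by_cases hv : pvNorm v = ""
    · rw [if_pos hv, if_neg (by simp [hv])]
      exact ih d
    · rw [if_neg hv, if_pos (by simp [hv]), List.foldl_cons]
      exact ih _

-- set.add is a no-op on a member
theorem pv_add_of_mem {α : Type} [BEq α] [LawfulBEq α] (s : PySem.Set α) (x : α) (h : x ∈ s) :
    PySem.Set.add s x = s := by
  simp [PySem.Set.add, PySem.Set.contains, h]

-- adding elements equal to an already-present x is a no-op, so they can be filtered away
theorem pv_foldl_add_drop {α : Type} [BEq α] [LawfulBEq α] (x : α) :
    ∀ (t : List α) (s : PySem.Set α), x ∈ s →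
      t.foldl PySem.Set.add s = (t.filter (fun y => !(y == x))).foldl PySem.Set.add s := by
  intro t
  induction t with
  | nil => intro s _; rfl
  | cons y t ih =>
    intro s hx
    by_cases hyx : y = x
    · subst hyx
      rw [List.filter_cons, if_neg (by simp), List.foldl_cons, pv_add_of_mem s y hx]
      exact ih s hx
    · rw [List.filter_cons, if_pos (by simp [hyx]), List.foldl_cons, List.foldl_cons]
      exact ih (PySem.Set.add s y) ((PySem.Set.mem_add s y x).mpr (Or.inl hx))

-- a head element never re-added stays at the front of the fold
theorem pv_foldl_add_cons {α : Type} [BEq α] [LawfulBEq α] (x : α) :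
    ∀ (t : List α) (s : PySem.Set α), (∀ y ∈ t, y ≠ x) →
      t.foldl PySem.Set.add (x :: s) = x :: t.foldl PySem.Set.add s := by
  intro t
  induction t with
  | nil => intro s _; rfl
  | cons y t ih =>
    intro s h
    have hy : y ≠ x := h y (by simp)
    have hadd : PySem.Set.add (x :: s) y = x :: PySem.Set.add s y := by
      simp only [PySem.Set.add, PySem.Set.contains, List.contains_cons]
      rw [show (y == x) = false from by simp [hy]]
      simp only [Bool.false_or]
      split_ifs <;> rfl
    rw [List.foldl_cons, hadd, ih (PySem.Set.add s y) (fun z hz => h z (by simp [hz])),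
        List.foldl_cons]

-- first-occurrence law of set(x :: t)
theorem pv_ofList_cons {α : Type} [BEq α] [LawfulBEq α] (x : α) (t : List α) :
    PySem.Set.ofList (x :: t) = x :: PySem.Set.ofList (t.filter (fun y => !(y == x))) := by
  rw [PySem.Set.ofList_eq_foldl, PySem.Set.ofList_eq_foldl, List.foldl_cons]
  have h0 : PySem.Set.add [] x = [x] := by
    simp [PySem.Set.add, PySem.Set.contains]
  rw [h0, pv_foldl_add_drop x t [x] (by simp),
      pv_foldl_add_cons x (t.filter (fun y => !(y == x))) []
        (fun y hy => by simpa using (List.of_mem_filter hy))]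

-- the set-building fold is a sublist of acc ++ input
theorem pv_foldl_add_sublist {α : Type} [BEq α] :
    ∀ (t : List α) (acc : List α), List.Sublist (t.foldl PySem.Set.add acc) (acc ++ t) := by
  intro t
  induction t with
  | nil => intro acc; simp
  | cons y t ih =>
    intro acc
    have h1 := ih (PySem.Set.add acc y)
    have h2 : List.Sublist (PySem.Set.add acc y ++ t) ((acc ++ [y]) ++ t) := by
      unfold PySem.Set.add
      split_ifs with hc
      · exact ((List.sublist_append_left acc [y]).append_right t)
      · exact List.Sublist.refl _
    rw [List.foldl_cons]
    exact h1.trans (by simpa using h2)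

theorem pv_ofList_sublist {α : Type} [BEq α] (xs : List α) :
    List.Sublist (PySem.Set.ofList xs) xs := by
  have := pv_foldl_add_sublist xs ([] : List α)
  rw [PySem.Set.ofList_eq_foldl]
  simpa using this

-- set(s) of a non-decreasing list is strictly increasing
theorem pv_ofList_pairwise_lt (s : List String) (hs : s.Pairwise (· ≤ ·)) :
    (PySem.Set.ofList s).Pairwise (· < ·) := by
  have h1 : (PySem.Set.ofList s).Pairwise (· ≤ ·) := hs.sublist (pv_ofList_sublist s)
  have h2 : (PySem.Set.ofList s).Pairwise (· ≠ ·) := PySem.Set.nodup_ofList s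
  exact (h1.and h2).imp (fun h => lt_of_le_of_ne h.1 h.2)

-- run-length invariant of B's grouping fold over a sorted list
theorem pv_runs :
    ∀ (s : List String) (d : PySem.Dict String Int) (ck : String) (cn : Int),
      s.Pairwise (· ≤ ·) → (∀ y ∈ s, ck ≤ y) → (∀ y, ck ≤ y → d.contains y = false) →
      (pvFlush (s.foldl pvStepB (d, some (ck, cn)))).items
        = d.items ++ (ck, cn + (s.count ck : Int))
            :: ((PySem.Set.ofList (s.filter (fun y => !(y == ck)))).map
                  (fun k => (k, (s.count k : Int)))) := by
  intro s
  induction s with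
  | nil =>
    intro d ck cn _ _ hd
    simp only [List.foldl_nil, pvFlush]
    rw [PySem.Dict.items_insert_of_not_contains d cn (hd ck le_rfl)]
    simp
  | cons x t ih =>
    intro d ck cn hs hck hd
    by_cases hx : x = ck
    · subst hx
      rw [List.foldl_cons, show pvStepB (d, some (x, cn)) x = (d, some (x, cn + 1)) from by
            simp [pvStepB]]
      rw [ih d x (cn + 1) hs.of_cons (fun y hy => (List.rel_of_pairwise_cons hs hy)) hd]
      have hcnt : ((List.count x (x :: t) : Nat) : Int) = (t.count x : Int) + 1 := by
        rw [List.count_cons_self]; omega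
      rw [hcnt]
      have hfil : (x :: t).filter (fun y => !(y == x)) = t.filter (fun y => !(y == x)) := by
        simp
      rw [hfil]
      have hmap : ∀ k ∈ PySem.Set.ofList (t.filter (fun y => !(y == x))),
          ((k, ((x :: t).count k : Int)) : String × Int) = (k, (t.count k : Int)) := by
        intro k hk
        have hkx : k ≠ x := by
          have := (PySem.Set.mem_ofList _ k).mp hk
          simpa using (List.of_mem_filter this)
        rw [List.count_cons_of_ne (fun h => hkx h.symm)]
      rw [List.map_congr_left hmap, show cn + 1 + ((t.count x : Nat) : Int)
            = cn + (((t.count x : Nat) : Int) + 1) from by ring]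
    · have hltx : ck < x := lt_of_le_of_ne (hck x (by simp)) (fun h => hx h.symm)
      have htck : ∀ y ∈ t, ck < y := fun y hy =>
        lt_of_lt_of_le hltx (List.rel_of_pairwise_cons hs hy)
      rw [List.foldl_cons, show pvStepB (d, some (ck, cn)) x = (d.insert ck cn, some (x, 1)) from by
            simp [pvStepB, Ne.symm hx]]
      rw [ih (d.insert ck cn) x 1 hs.of_cons (fun y hy => List.rel_of_pairwise_cons hs hy)
            (by
              intro y hy
              rw [PySem.Dict.contains_insert]
              have hyck : y ≠ ck := ne_of_gt (lt_of_lt_of_le hltx hy)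
              simp only [show (y == ck) = false from by simp [hyck], Bool.false_or]
              exact hd y (le_of_lt (lt_of_lt_of_le hltx hy)))]
      rw [PySem.Dict.items_insert_of_not_contains d cn (hd ck le_rfl)]
      have hckcnt : ((x :: t).count ck : Int) = 0 := by
        rw [List.count_cons_of_ne (fun h => hx h)]
        rw [List.count_eq_zero_of_not_mem (fun h => (ne_of_gt (htck ck h)) rfl)]
        rfl
      have hfil : (x :: t).filter (fun y => !(y == ck)) = x :: t := by
        rw [List.filter_cons, if_pos (by simp [hx])]
        congr 1
        exact List.filter_eq_self.mpr (fun y hy => by simp [ne_of_gt (htck y hy)])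
      rw [hckcnt, hfil, pv_ofList_cons]
      simp only [List.map_cons]
      have hheadcnt : (((x :: t).count x : Nat) : Int) = 1 + (t.count x : Int) := by
        rw [List.count_cons_self]; omega
      have hmap : ∀ k ∈ PySem.Set.ofList (t.filter (fun y => !(y == x))),
          ((k, ((x :: t).count k : Int)) : String × Int) = (k, (t.count k : Int)) := by
        intro k hk
        have hkx : k ≠ x := by
          have := (PySem.Set.mem_ofList _ k).mp hk
          simpa using (List.of_mem_filter this)
        rw [List.count_cons_of_ne (fun h => hkx h.symm)]
      rw [List.map_congr_left hmap, hheadcnt]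
      simp

-- B's grouping fold over any sorted list yields (distinct key, count) pairs in first-occurrence order
theorem pv_group_all (s : List String) (hspw : s.Pairwise (· ≤ ·)) :
    (pvFlush (s.foldl pvStepB (PySem.Dict.empty, none))).items
      = (PySem.Set.ofList s).map (fun k => (k, (s.count k : Int))) := by
  cases s with
  | nil => rfl
  | cons x t =>
    rw [List.foldl_cons, show pvStepB (PySem.Dict.empty, none) x
          = (PySem.Dict.empty, some (x, 1)) from by simp [pvStepB]]
    rw [pv_runs t PySem.Dict.empty x 1 hspw.of_cons
          (fun y hy => List.rel_of_pairwise_cons hspw hy)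
          (fun y _ => PySem.Dict.contains_empty y)]
    rw [pv_ofList_cons]
    simp only [List.map_cons]
    have hheadcnt : (((x :: t).count x : Nat) : Int) = 1 + (t.count x : Int) := by
      rw [List.count_cons_self]; omega
    have hmap : ∀ k ∈ PySem.Set.ofList (t.filter (fun y => !(y == x))),
        ((k, ((x :: t).count k : Int)) : String × Int) = (k, (t.count k : Int)) := by
      intro k hk
      have hkx : k ≠ x := by
        have := (PySem.Set.mem_ofList _ k).mp hk
        simpa using (List.of_mem_filter this)
      rw [List.count_cons_of_ne (fun h => hkx h.symm)]
    rw [List.map_congr_left hmap, hheadcnt]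
    simp [show PySem.Dict.empty.items = ([] : List (String × Int)) from rfl]

-- B's sort-then-group pass produces the counts of the distinct keys in increasing order
theorem pv_B_eq_T (ks : List String) :
    (pvFlush ((PySem.List.sorted ks (fun x => x)).foldl pvStepB (PySem.Dict.empty, none))).items
      = (PySem.List.sorted (PySem.Set.ofList ks) (fun x => x)).map
          (fun k => (k, (ks.count k : Int))) := by
  have hspw : (PySem.List.sorted ks (fun x => x)).Pairwise (· ≤ ·) := by
    simpa using PySem.List.sorted_pairwise ks (fun x => x)
  have hsortset : PySem.List.sorted (PySem.Set.ofList ks) (fun x => x)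
      = PySem.Set.ofList (PySem.List.sorted ks (fun x => x)) := by
    apply PySem.List.sorted_eq_of_perm_of_pairwise_lt
    · rw [List.perm_ext_iff_of_nodup (PySem.Set.nodup_ofList _) (PySem.Set.nodup_ofList _)]
      intro a
      rw [PySem.Set.mem_ofList, PySem.Set.mem_ofList, PySem.List.mem_sorted]
    · exact pv_ofList_pairwise_lt _ hspw
  rw [hsortset, pv_group_all _ hspw]
  apply List.map_congr_left
  intro k _
  rw [show ks.count k = (PySem.List.sorted ks (fun x => x)).count k from
        ((PySem.List.sorted_perm ks (fun x => x) false).count_eq k).symm]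

-- ===== VERDICT (by name: the statement is the Claim_ definition above) =====
theorem calculate_exposure_vector_counts_spec : Claim_equal_calculate_exposure_vector_counts := by
  intro vectors _
  unfold Spec_calculate_exposure_vector_counts
  unfold calculate_exposure_vector_counts calculate_exposure_vector_counts_alt
  simp only []
  set l := vectors.getD [] with hl
  set ks := ((l.map pvNorm).filter (fun k => decide (k ≠ ""))) with hks
  -- A side: the loop builds Counter(ks), whose items are the distinct keys with their counts
  rw [pv_foldA, ← hks, PySem.Dict.foldl_insert_getD_add_one_eq_counter, PySem.Dict.items_counter]
  -- B side: the grouping fold over sorted(ks)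
  rw [pv_B_eq_T ks]
  -- sorting the pairs by tuple = mapping the sorted distinct keys
  have key1 : ∀ p ∈ (PySem.Set.ofList ks).map (fun k => (k, (ks.count k : Int))),
      p = (p.1, (ks.count p.1 : Int)) := by
    intro p hp
    rcases List.mem_map.mp hp with ⟨k, _, rfl⟩
    rfl
  have hinj : ∀ a ∈ (PySem.Set.ofList ks).map (fun k => (k, (ks.count k : Int))),
      ∀ b ∈ (PySem.Set.ofList ks).map (fun k => (k, (ks.count k : Int))), a.1 = b.1 → a = b := by
    intro a ha b hb hab
    rw [key1 a ha, key1 b hb, hab]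
  rw [pv_sorted2_eq_sorted_fst _ hinj]
  apply PySem.List.sorted_eq_of_perm_of_pairwise_lt
  · exact ((PySem.List.sorted_perm (PySem.Set.ofList ks) (fun x => x) false).map _)
  · have hpw := PySem.List.sorted_ofList_pairwise_lt (κ := String) ks
    exact List.Pairwise.map _ (fun a b hab => by simpa using hab) hpw
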